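-- pv_equiv track=rewrite | github.com/zswvivi/ecml_pqa | ndcgprime.py | rank_by
-- ===== SOURCE A (Python) =====
-- def rank_by(row,col,by):
--     r2=row[by]
--     indices = list(range(len(r2)))
--     indices.sort(key=lambda x: r2[x],reverse=True)
--     r2 = [r2[i] for i in indices]
--
--     r1 = row[col]
--     r1 = [r1[i] for i in indices]
--     r1 = [r1[index] for  index,value in enumerate(r2) if value>0]
--
--     row[col+"_by_"+by] = r1
--     return row
-- ===== SOURCE B (Python) =====
-- def rank_by(row, col, by):
--     buckets = {}
--     for k, v in zip(row[by], row[col]):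
--         if k > 0:
--             buckets.setdefault(k, []).append(v)
--     out = []
--     for k in sorted(buckets, reverse=True):
--         out.extend(buckets[k])
--     row[col + "_by_" + by] = out
--     return row
-- ===== Notes on version B (the rewrite author's own statement) =====
-- stated objective: alternative
-- what changed: B never sorts the data: it groups values into a dict of buckets keyed by their (positive) key in one pass, then emits the buckets in descending order of the distinct keys, instead of argsorting an index permutation and reindexing through it.
import Mathlib
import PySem

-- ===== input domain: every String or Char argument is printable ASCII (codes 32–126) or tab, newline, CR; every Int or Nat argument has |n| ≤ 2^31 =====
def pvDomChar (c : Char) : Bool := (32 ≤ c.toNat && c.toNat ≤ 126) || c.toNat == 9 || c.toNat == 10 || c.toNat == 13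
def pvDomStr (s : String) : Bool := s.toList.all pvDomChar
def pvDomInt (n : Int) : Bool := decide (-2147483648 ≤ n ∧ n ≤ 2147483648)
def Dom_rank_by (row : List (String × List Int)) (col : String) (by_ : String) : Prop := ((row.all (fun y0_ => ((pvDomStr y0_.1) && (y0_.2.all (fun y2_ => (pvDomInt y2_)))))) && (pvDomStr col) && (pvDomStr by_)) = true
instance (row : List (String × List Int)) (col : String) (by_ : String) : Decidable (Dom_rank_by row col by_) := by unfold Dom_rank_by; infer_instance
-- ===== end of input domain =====

-- B replaces A's sort-an-index-permutation-and-reindex scheme by a sort-free grouping pass: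
-- it buckets values by their positive key in a dict and emits the buckets by descending
-- distinct key (objective: alternative). Equivalence is about the returned value; both
-- programs also mutate the dict argument in the same way.

-- ===== PORT A =====
def rank_by (row : List (String × List Int)) (col : String) (by_ : String) : List (String × List Int) :=
  let d : PySem.Dict String (List Int) := ⟨row⟩
  let r2 := (PySem.Dict.get? d by_).getD []
  let indices := PySem.List.pyRange 0 (PySem.List.len r2)
  let indices := PySem.List.sorted indices (fun x => PySem.List.pyGetD r2 x 0) true
  let r2s := indices.map (fun i => PySem.List.pyGetD r2 i 0)
  let r1 := (PySem.Dict.get? d col).getD []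
  let r1s := indices.map (fun i => PySem.List.pyGetD r1 i 0)
  let r1f := (PySem.List.enumerate r2s).filterMap
    (fun p => if 0 < p.2 then some (PySem.List.pyGetD r1s p.1 0) else none)
  (PySem.Dict.insert d (col ++ "_by_" ++ by_) r1f).items

-- ===== PORT B =====
def rank_by_alt (row : List (String × List Int)) (col : String) (by_ : String) : List (String × List Int) :=
  let d : PySem.Dict String (List Int) := ⟨row⟩
  let pairs := List.zip ((PySem.Dict.get? d by_).getD []) ((PySem.Dict.get? d col).getD [])
  -- buckets.setdefault(k, []).append(v)  ≡  buckets[k] = buckets.get(k, []) + [v]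
  let buckets := pairs.foldl
    (fun b p => if 0 < p.1 then PySem.Dict.modify b p.1 [] (· ++ [p.2]) else b)
    (PySem.Dict.empty : PySem.Dict Int (List Int))
  let ks := PySem.List.sorted (PySem.Dict.keys buckets) (fun x => x) true
  let out := ks.foldl (fun acc k => acc ++ PySem.Dict.getD buckets k []) []
  (PySem.Dict.insert d (col ++ "_by_" ++ by_) out).items

-- ===== PRECONDITION & SPEC =====
-- Pre_ excludes exactly the inputs where A raises: a missing key (KeyError) and, with both
-- keys present, row[col] shorter than row[by] (IndexError); A returns on everything Pre_ admits.
def Pre_rank_by (row : List (String × List Int)) (col : String) (by_ : String) : Prop :=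
  (PySem.Dict.get? (⟨row⟩ : PySem.Dict String (List Int)) by_).isSome = true ∧
  (PySem.Dict.get? (⟨row⟩ : PySem.Dict String (List Int)) col).isSome = true ∧
  ((PySem.Dict.get? (⟨row⟩ : PySem.Dict String (List Int)) by_).getD []).length ≤
    ((PySem.Dict.get? (⟨row⟩ : PySem.Dict String (List Int)) col).getD []).length
instance (row : List (String × List Int)) (col : String) (by_ : String) : Decidable (Pre_rank_by row col by_) := by unfold Pre_rank_by; infer_instance

def pvWitness_rank_by : (List (String × List Int)) × String × String :=
  ([("a", [1, -2, 1]), ("b", [3, 4, 5])], "b", "a")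

def Spec_rank_by (row : List (String × List Int)) (col : String) (by_ : String) (out : List (String × List Int)) : Prop := out = rank_by_alt row col by_
instance (row : List (String × List Int)) (col : String) (by_ : String) (out : List (String × List Int)) : Decidable (Spec_rank_by row col by_ out) := by unfold Spec_rank_by; infer_instance

-- ===== CLAIM (what is proved, stated in full; the proofs are below) =====
def Claim_equal_rank_by : Prop := ∀ (row : List (String × List Int)) (col : String) (by_ : String), Dom_rank_by row col by_ → Pre_rank_by row col by_ → Spec_rank_by row col by_ (rank_by row col by_)

-- ===== LEMMAS AND PROOFS =====

-- ---- step 1: A's argsort-and-reindex value is the positive-filter of the stable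
-- ---- descending sort of the zipped (key, value) pairs ----

-- insertBy with reversed-key comparison commutes with map when the key factors through g
theorem insertBy_map {α β : Type} (g : α → β) (key : β → Int) (x : α) (acc : List α) :
    PySem.List.insertBy (fun a b => decide (key b < key a)) (g x) (acc.map g)
      = (PySem.List.insertBy (fun a b => decide (key (g b) < key (g a))) x acc).map g := by
  induction acc with
  | nil => rfl
  | cons y ys ih =>
      simp only [List.map_cons, PySem.List.insertBy]
      split_ifs <;> simp_all

-- a stable reverse sort of a mapped list is the mapped stable reverse sort
theorem sorted_rev_map {α β : Type} (l : List α) (g : α → β) (key : β → Int) :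
    PySem.List.sorted (l.map g) key true
      = (PySem.List.sorted l (fun a => key (g a)) true).map g := by
  rw [PySem.List.sorted_rev_eq_foldl_insertBy, PySem.List.sorted_rev_eq_foldl_insertBy]
  suffices h : ∀ acc : List α,
      List.foldl (fun acc x => PySem.List.insertBy (fun a b => decide (key b < key a)) x acc)
        (acc.map g) (l.map g)
      = (List.foldl (fun acc x => PySem.List.insertBy (fun a b => decide (key (g b) < key (g a))) x acc)
          acc l).map g by
    simpa using h []
  induction l with
  | nil => intro acc; rfl
  | cons x t ih =>
      intro acc
      simp only [List.map_cons, List.foldl_cons, insertBy_map g key x acc]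
      exact ih _

theorem getD_append_length {α : Type} (v₁ : List α) (b : α) (t : List α) (d : α) :
    (v₁ ++ b :: t).getD v₁.length d = b := by
  simp

-- enumerate-and-index-back equals zip-and-project, for equal-length lists
theorem enum_filter_eq_zip (u v₂ v₁ : List Int) (h : u.length = v₂.length) :
    (PySem.List.enumerate u (v₁.length : Int)).filterMap
        (fun p => if 0 < p.2 then some (PySem.List.pyGetD (v₁ ++ v₂) p.1 0) else none)
      = (u.zip v₂).filterMap (fun p => if 0 < p.1 then some p.2 else none) := by
  induction u generalizing v₁ v₂ with
  | nil => simp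
  | cons a u ih =>
      cases v₂ with
      | nil => simp at h
      | cons b t =>
          simp only [PySem.List.enumerate, List.filterMap_cons, List.zip_cons_cons]
          have h1 : PySem.List.pyGetD (v₁ ++ b :: t) (v₁.length : Int) 0 = b := by
            rw [PySem.List.pyGetD_natCast, getD_append_length]
          have h2 : ((v₁.length : Int) + 1) = ((v₁ ++ [b]).length : Int) := by
            simp
          have h3 := ih t (v₁ ++ [b]) (by simpa using h)
          simp only [List.append_assoc, List.cons_append, List.nil_append] at h3
          rw [h1, h2, h3]

-- zip of two lists as a map over the range of indices of the first
theorem zip_eq_map_range (r2 r1 : List Int) (h : r2.length ≤ r1.length) :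
    r2.zip r1 = (List.range r2.length).map (fun k => (r2.getD k 0, r1.getD k 0)) := by
  induction r2 generalizing r1 with
  | nil => simp
  | cons a t ih =>
      cases r1 with
      | nil => simp at h
      | cons b s =>
          simp only [List.zip_cons_cons, List.length_cons, List.range_succ_eq_map,
            List.map_cons, List.map_map]
          refine congrArg (List.cons (a, b)) ?_
          rw [ih s (by simpa using h)]
          rfl

-- A's value-list equals the filter of the stable descending pair sort
theorem core_eq (r2 r1 : List Int) (hlen : r2.length ≤ r1.length) :
    (PySem.List.enumerate
        ((PySem.List.sorted (PySem.List.pyRange 0 (PySem.List.len r2))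
            (fun x => PySem.List.pyGetD r2 x 0) true).map
          (fun i => PySem.List.pyGetD r2 i 0))).filterMap
      (fun p => if 0 < p.2 then
          some (PySem.List.pyGetD
            ((PySem.List.sorted (PySem.List.pyRange 0 (PySem.List.len r2))
                (fun x => PySem.List.pyGetD r2 x 0) true).map
              (fun i => PySem.List.pyGetD r1 i 0)) p.1 0)
        else none)
    = (PySem.List.sorted (r2.zip r1) (fun p => p.1) true).filterMap
        (fun p => if 0 < p.1 then some p.2 else none) := by
  have hzip : r2.zip r1 = (PySem.List.pyRange 0 (PySem.List.len r2)).map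
      (fun i => (PySem.List.pyGetD r2 i 0, PySem.List.pyGetD r1 i 0)) := by
    rw [zip_eq_map_range r2 r1 hlen]
    have hl : PySem.List.len r2 = (r2.length : Int) := by simp [PySem.List.len]
    rw [hl, PySem.List.pyRange_zero_natCast, List.map_map]
    refine List.map_congr_left ?_
    intro k _
    simp [PySem.List.pyGetD_natCast]
  rw [hzip, sorted_rev_map]
  have hA := enum_filter_eq_zip
      ((PySem.List.sorted (PySem.List.pyRange 0 (PySem.List.len r2))
          (fun x => PySem.List.pyGetD r2 x 0) true).map (fun i => PySem.List.pyGetD r2 i 0))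
      ((PySem.List.sorted (PySem.List.pyRange 0 (PySem.List.len r2))
          (fun x => PySem.List.pyGetD r2 x 0) true).map (fun i => PySem.List.pyGetD r1 i 0))
      [] (by simp)
  simp only [List.length_nil, Nat.cast_zero, List.nil_append] at hA
  rw [hA, List.zip_map']

-- ---- step 2: the stable descending pair sort, filtered positive, equals B's
-- ---- bucket-by-key-and-emit-descending value ----

-- insertBy (descending by key) preserves the descending-pairwise invariant
theorem insertBy_pairwise {α : Type} (key : α → Int) (x : α) (acc : List α)
    (h : acc.Pairwise (fun a b => key b ≤ key a)) :
    (PySem.List.insertBy (fun a b => decide (key b < key a)) x acc).Pairwise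
      (fun a b => key b ≤ key a) := by
  induction acc with
  | nil => simp [PySem.List.insertBy]
  | cons y ys ih =>
      rw [List.pairwise_cons] at h
      simp only [PySem.List.insertBy]
      by_cases hxy : key y < key x
      · rw [if_pos (by simpa using hxy)]
        refine List.pairwise_cons.2 ⟨?_, List.pairwise_cons.2 h⟩
        intro z hz
        rcases List.mem_cons.1 hz with rfl | hz
        · exact le_of_lt hxy
        · exact le_trans (h.1 z hz) (le_of_lt hxy)
      · rw [if_neg (by simpa using hxy)]
        refine List.pairwise_cons.2 ⟨?_, ih h.2⟩
        intro z hz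
        rcases (PySem.List.mem_insertBy _ _ _ _).1 hz with rfl | hz
        · exact not_lt.1 hxy
        · exact h.1 z hz

-- filtering by an exact key commutes with the stable insert (descending invariant)
theorem filter_insertBy {α : Type} (key : α → Int) (k : Int) (x : α) (acc : List α)
    (h : acc.Pairwise (fun a b => key b ≤ key a)) :
    (PySem.List.insertBy (fun a b => decide (key b < key a)) x acc).filter
        (fun p => key p == k)
      = if key x == k then acc.filter (fun p => key p == k) ++ [x]
        else acc.filter (fun p => key p == k) := by
  induction acc with
  | nil =>
      by_cases hk : key x == k <;>
        simp [PySem.List.insertBy, hk]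
  | cons y ys ih =>
      rw [List.pairwise_cons] at h
      simp only [PySem.List.insertBy]
      by_cases hxy : key y < key x
      · rw [if_pos (by simpa using hxy)]
        by_cases hk : key x == k
        · have hkk := beq_iff_eq.mp hk
          have hempty : (y :: ys).filter (fun p => key p == k) = [] := by
            rw [List.filter_eq_nil_iff]
            intro a ha
            have hlt : key a < key x := by
              rcases List.mem_cons.1 ha with rfl | ha
              · exact hxy
              · exact lt_of_le_of_lt (h.1 a ha) hxy
            simp only [beq_iff_eq]
            omega
          rw [List.filter_cons, if_pos hk, hempty, if_pos hk]
          simp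
        · rw [List.filter_cons, if_neg hk, if_neg hk]
      · rw [if_neg (by simpa using hxy)]
        rw [List.filter_cons, ih h.2, List.filter_cons]
        by_cases hk : key x == k <;> by_cases hyk : key y == k <;> simp [hk, hyk]

-- stability of the reverse sort: the elements of any one key class keep their order
theorem filter_sorted_rev {α : Type} (key : α → Int) (k : Int) (l : List α) :
    (PySem.List.sorted l key true).filter (fun p => key p == k)
      = l.filter (fun p => key p == k) := by
  rw [PySem.List.sorted_rev_eq_foldl_insertBy]
  suffices h : ∀ acc : List α, acc.Pairwise (fun a b => key b ≤ key a) →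
      (List.foldl (fun acc x => PySem.List.insertBy (fun a b => decide (key b < key a)) x acc)
          acc l).filter (fun p => key p == k)
        = acc.filter (fun p => key p == k) ++ l.filter (fun p => key p == k) by
    simpa using h [] (by simp)
  induction l with
  | nil => intro acc _; simp
  | cons x t ih =>
      intro acc hacc
      simp only [List.foldl_cons]
      rw [ih _ (insertBy_pairwise key x acc hacc), filter_insertBy key k x acc hacc]
      by_cases hk : key x == k <;> simp [hk]

-- in a descending-sorted list bounded by d, the d-class is a prefix
theorem split_top_class {α : Type} (key : α → Int) (d : Int) (u : List α) :
    u.Pairwise (fun a b => key b ≤ key a) → (∀ p ∈ u, key p ≤ d) →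
      u = u.filter (fun p => key p == d) ++ u.filter (fun p => !(key p == d)) := by
  induction u with
  | nil => intro _ _; rfl
  | cons p t iht =>
      intro hu hud
      rw [List.pairwise_cons] at hu
      by_cases hpd : key p = d
      · have hb : (key p == d) = true := beq_iff_eq.mpr hpd
        have ht := iht hu.2 (fun q hq => hud q (List.mem_cons_of_mem _ hq))
        simp [hb, ← ht]
      · have hb : (key p == d) = false := beq_eq_false_iff_ne.mpr hpd
        have hplt : key p < d := lt_of_le_of_ne (hud p (by simp)) hpd
        have hnone : t.filter (fun q => key q == d) = [] := by
          rw [List.filter_eq_nil_iff]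
          intro q hq
          have hqp : key q ≤ key p := hu.1 q hq
          simp only [beq_iff_eq]
          omega
        have hall : t.filter (fun q => !(key q == d)) = t := by
          rw [List.filter_eq_self]
          intro q hq
          have hqp : key q ≤ key p := hu.1 q hq
          simp only [Bool.not_eq_true', beq_eq_false_iff_ne, ne_eq]
          omega
        simp [hb, hnone, hall]

-- a descending-sorted list is the concatenation of its key classes, taken along any
-- strictly descending key list covering all its keys
theorem group_decomp {α : Type} (key : α → Int) (ds : List Int) (s : List α)
    (hds : ds.Pairwise (· > ·)) (hsp : s.Pairwise (fun a b => key b ≤ key a))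
    (hcov : ∀ p ∈ s, key p ∈ ds) :
    s = ds.flatMap (fun j => s.filter (fun p => key p == j)) := by
  induction ds generalizing s with
  | nil =>
      cases s with
      | nil => rfl
      | cons p t => exact absurd (hcov p (by simp)) (by simp)
  | cons d ds' ih =>
      rw [List.pairwise_cons] at hds
      have hle : ∀ p ∈ s, key p ≤ d := by
        intro p hp
        rcases List.mem_cons.1 (hcov p hp) with h | h
        · omega
        · exact le_of_lt (hds.1 _ h)
      have hrest_pw : (s.filter (fun p => !(key p == d))).Pairwise
          (fun a b => key b ≤ key a) := hsp.filter _
      have hrest_cov : ∀ p ∈ s.filter (fun p => !(key p == d)), key p ∈ ds' := by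
        intro p hp
        rw [List.mem_filter] at hp
        rcases List.mem_cons.1 (hcov p hp.1) with h | h
        · exact absurd hp.2 (by simp [h])
        · exact h
      have hrec := ih _ hds.2 hrest_pw hrest_cov
      simp only [List.flatMap_cons]
      refine (split_top_class key d s hsp hle).trans
        (congrArg (s.filter (fun p => key p == d) ++ ·) ?_)
      rw [hrec]
      refine List.flatMap_congr (fun j hj => ?_)
      have hjd : j < d := hds.1 j hj
      rw [List.filter_filter]
      refine List.filter_congr (fun p _ => ?_)
      by_cases hpj : key p = j
      · have h1 : (key p == j) = true := beq_iff_eq.mpr hpj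
        have h2 : (key p == d) = false := beq_eq_false_iff_ne.mpr (by omega)
        simp [h1, h2]
      · have h1 : (key p == j) = false := beq_eq_false_iff_ne.mpr hpj
        simp [h1]

-- filterMap of a guarded projection is map-of-filter
theorem filterMap_pos_eq_map_filter (l : List (Int × Int)) :
    l.filterMap (fun p => if 0 < p.1 then some p.2 else none)
      = (l.filter (fun p => decide (0 < p.1))).map (fun p => p.2) := by
  induction l with
  | nil => rfl
  | cons p t ih =>
      by_cases hp : 0 < p.1 <;> simp [List.filterMap_cons, hp, ih]

-- the bridge: stable-descending-sort-then-filter-positive equals B's bucket emission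
theorem bucket_eq (l : List (Int × Int)) :
    (PySem.List.sorted l (fun p => p.1) true).filterMap
        (fun p => if 0 < p.1 then some p.2 else none)
      = (PySem.List.sorted
            (PySem.Set.ofList ((l.filter (fun p => decide (0 < p.1))).map (fun p => p.1)))
            (fun x => x) true).flatMap
          (fun k => ((l.filter (fun p => decide (0 < p.1))).filter
              (fun p => p.1 == k)).map (fun p => p.2)) := by
  set fl := l.filter (fun p => decide (0 < p.1)) with hfl
  set ks := PySem.List.sorted (PySem.Set.ofList (fl.map (fun p => p.1))) (fun x => x) true
    with hks
  rw [filterMap_pos_eq_map_filter]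
  have hmap : (ks.flatMap (fun k => (fl.filter (fun p => p.1 == k)).map (fun p => p.2)))
      = (ks.flatMap (fun k => fl.filter (fun p => p.1 == k))).map (fun p => p.2) := by
    rw [List.map_flatMap]
  rw [hmap]
  refine congrArg (List.map (fun p : Int × Int => p.2)) ?_
  -- ks is strictly descending
  have hks_nodup : ks.Nodup := (PySem.List.sorted_perm _ _ _).nodup_iff.2
    (PySem.Set.nodup_ofList _)
  have hks_pw : ks.Pairwise (· > ·) := by
    have h1 : ks.Pairwise (fun a b => b ≤ a) := PySem.List.sorted_pairwise_rev _ _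
    have h2 := List.Pairwise.and h1 hks_nodup
    exact h2.imp (fun {a b} hab => lt_of_le_of_ne hab.1 (Ne.symm hab.2))
  -- apply the decomposition to the sorted-filtered list
  have hs_pw : ((PySem.List.sorted l (fun p => p.1) true).filter
      (fun p => decide (0 < p.1))).Pairwise (fun a b : Int × Int => b.1 ≤ a.1) :=
    (PySem.List.sorted_pairwise_rev _ _).filter _
  have hcov : ∀ p ∈ (PySem.List.sorted l (fun p => p.1) true).filter
      (fun p => decide (0 < p.1)), p.1 ∈ ks := by
    intro p hp
    rw [List.mem_filter] at hp
    have hpl : p ∈ l := (PySem.List.mem_sorted _ _ _ _).1 hp.1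
    have hpfl : p ∈ fl := by
      rw [hfl, List.mem_filter]
      exact ⟨hpl, hp.2⟩
    rw [hks, PySem.List.mem_sorted, PySem.Set.mem_ofList]
    exact List.mem_map_of_mem hpfl
  have hdec := group_decomp (fun p : Int × Int => p.1) ks
      ((PySem.List.sorted l (fun p => p.1) true).filter (fun p => decide (0 < p.1)))
      hks_pw hs_pw hcov
  rw [hdec]
  refine List.flatMap_congr (fun k hk => ?_)
  -- k is positive
  have hkpos : 0 < k := by
    rw [hks, PySem.List.mem_sorted, PySem.Set.mem_ofList] at hk
    rcases List.mem_map.1 hk with ⟨p, hp, hpk⟩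
    rw [hfl, List.mem_filter] at hp
    have := hp.2
    simp only [decide_eq_true_iff] at this
    omega
  -- the double filters collapse to the single key-class filter, on both sides
  have hleft : ((PySem.List.sorted l (fun p => p.1) true).filter
        (fun p => decide (0 < p.1))).filter (fun p => p.1 == k)
      = (PySem.List.sorted l (fun p => p.1) true).filter (fun p => p.1 == k) := by
    rw [List.filter_filter]
    refine List.filter_congr (fun p _ => ?_)
    by_cases hpk : p.1 == k
    · have : (0:Int) < p.1 := by rw [beq_iff_eq] at hpk; omega
      simp [hpk, this]
    · simp [hpk]
  have hright : fl.filter (fun p => p.1 == k)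
      = l.filter (fun p => p.1 == k) := by
    rw [hfl, List.filter_filter]
    refine List.filter_congr (fun p _ => ?_)
    by_cases hpk : p.1 == k
    · have : (0:Int) < p.1 := by rw [beq_iff_eq] at hpk; omega
      simp [hpk, this]
    · simp [hpk]
  rw [hleft, hright, filter_sorted_rev (fun p : Int × Int => p.1) k l]

-- ===== VERDICT (by name: the statement is the Claim_ definition above) =====
theorem rank_by_spec : Claim_equal_rank_by := by
  intro row col by_ _ hpre
  obtain ⟨_, _, hlen⟩ := hpre
  unfold Spec_rank_by rank_by rank_by_alt
  simp only []
  refine congrArg (fun v =>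
      (PySem.Dict.insert (⟨row⟩ : PySem.Dict String (List Int)) (col ++ "_by_" ++ by_) v).items) ?_
  rw [core_eq _ _ hlen, bucket_eq]
  -- identify B's fold-built buckets with the filters used in bucket_eq
  set r2 := (PySem.Dict.get? (⟨row⟩ : PySem.Dict String (List Int)) by_).getD [] with hr2
  set r1 := (PySem.Dict.get? (⟨row⟩ : PySem.Dict String (List Int)) col).getD [] with hr1
  set pairs := r2.zip r1 with hpairs
  set buckets := pairs.foldl
    (fun b p => if 0 < p.1 then PySem.Dict.modify b p.1 [] (· ++ [p.2]) else b)
    (PySem.Dict.empty : PySem.Dict Int (List Int)) with hbuckets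
  set fl := pairs.filter (fun p => decide (0 < p.1)) with hfl
  have hb2 : buckets = fl.foldl (fun b p => PySem.Dict.modify b p.1 [] (· ++ [p.2]))
      (PySem.Dict.empty : PySem.Dict Int (List Int)) := by
    rw [hbuckets, hfl, PySem.List.foldl_ite_eq_foldl_filter]
  have hkeys : PySem.Dict.keys buckets = PySem.Set.ofList (fl.map (fun p => p.1)) := by
    rw [hb2, PySem.Dict.keys_foldl_modify_key (key := fun p : Int × Int => p.1)]
    simp [PySem.Set.ofList_eq_foldl, PySem.Set.update]
  rw [hkeys]
  rw [PySem.List.foldl_append_eq_flatMap]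
  simp only [List.nil_append]
  refine List.flatMap_congr (fun k _ => ?_)
  rw [hb2, PySem.Dict.getD_foldl_modify_append]
  simp
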